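-- pv_equiv track=rewrite | github.com/nazmulcuet11/acm | InterviewBit/maths/rearrange-array.py | dfs
-- ===== SOURCE A (Python) =====
-- def dfs(x, A):
--     if A[x] < 0:
--         return A[x]
--
--     t = A[x]
--     A[x] = -A[x]
--     next = 0 if t == len(A) else t
--     A[x] = dfs(next, A)
--     return -t
-- ===== SOURCE B (Python) =====
-- def dfs(x, A):
--     # Iterative replacement for A's recursion: forward marking loop, then
--     # replay the unwind over an explicit stack (mutates A like A does).
--     stack = []
--     cur = x
--     while A[cur] >= 0:
--         t = A[cur]
--         A[cur] = -t
--         stack.append((cur, t))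
--         cur = 0 if t == len(A) else t
--     prev = A[cur]
--     for idx, t in reversed(stack):
--         A[idx] = prev
--         prev = -t
--     return prev
-- ===== Notes on version B (the rewrite author's own statement) =====
-- stated objective: alternative
-- what changed: Replaces A's in-place permutation-cycle recursion by an explicit forward marking loop with an (index,value) stack plus a reversed replay of the unwind, reproducing the same mutations and negated return iteratively.
import Mathlib
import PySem

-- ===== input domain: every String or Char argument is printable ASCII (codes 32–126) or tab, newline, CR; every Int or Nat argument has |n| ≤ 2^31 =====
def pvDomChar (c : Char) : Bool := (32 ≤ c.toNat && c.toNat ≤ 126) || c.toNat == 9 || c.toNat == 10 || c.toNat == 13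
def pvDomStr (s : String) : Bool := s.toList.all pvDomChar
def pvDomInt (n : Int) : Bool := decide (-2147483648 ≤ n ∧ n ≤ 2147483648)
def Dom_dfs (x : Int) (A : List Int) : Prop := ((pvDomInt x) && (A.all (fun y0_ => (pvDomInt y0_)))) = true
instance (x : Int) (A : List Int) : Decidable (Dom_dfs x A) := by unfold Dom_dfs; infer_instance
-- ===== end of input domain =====

-- B replaces A's in-place recursion by an explicit forward marking loop plus a reversed
-- replay of the unwind (same return value AND same final mutation of A; the equivalence
-- proved here is about the return value only).

-- ===== PORT A =====
-- Fuel-based transliteration of A's recursion; the state is (return value, mutated list).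
-- On every input Pre_dfs admits the recursion depth is ≤ A.length + 2, so the fuel suffices.
def dfsA : Nat → Int → List Int → Option (Int × List Int)
  | 0, _, _ => none
  | (fuel+1), x, A =>
    match PySem.List.pyGet? A x with          -- A[x] (IndexError = none)
    | none => none
    | some v =>
      if v < 0 then some (v, A)               -- if A[x] < 0: return A[x]
      else
        let t := v                            -- t = A[x]
        let A1 := PySem.List.pySetD A x (-v)  -- A[x] = -A[x] (index known in range here)
        let next : Int := if t = (A.length : Int) then 0 else t
        match dfsA fuel next A1 with
        | none => none
        | some (r, A2) => some (-t, PySem.List.pySetD A2 x r)  -- A[x] = dfs(next, A); return -t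

def dfs (x : Int) (A : List Int) : Int :=
  match dfsA (A.length + 2) x A with
  | some (r, _) => r
  | none => 0

-- ===== PORT B =====
-- forward marking loop of Source B: while A[cur] >= 0: mark, push (cur, t), advance
def dfsBloop : Nat → Int → List Int → List (Int × Int) → Option (Int × List Int × List (Int × Int))
  | 0, _, _, _ => none
  | (fuel+1), cur, A, st =>
    match PySem.List.pyGet? A cur with        -- A[cur] in the loop condition
    | none => none
    | some v =>
      if v ≥ 0 then
        dfsBloop fuel (if v = (A.length : Int) then 0 else v)
          (PySem.List.pySetD A cur (-v)) (st ++ [(cur, v)])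
      else some (cur, A, st)

-- replay of the unwind: for (idx, t) in reversed(stack): A[idx] = prev; prev = -t
def dfsBunwind (st : List (Int × Int)) (prev : Int) (A : List Int) : Int × List Int :=
  st.reverse.foldl (fun s it => (-(it.2), PySem.List.pySetD s.2 it.1 s.1)) (prev, A)

def dfs_alt (x : Int) (A : List Int) : Int :=
  match dfsBloop (A.length + 2) x A [] with
  | none => 0
  | some r =>
    match PySem.List.pyGet? r.2.1 r.1 with    -- prev = A[cur]
    | some v => (dfsBunwind r.2.2 v r.2.1).1  -- run the unwind, return final prev
    | none => 0

-- ===== PRECONDITION & SPEC =====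
-- the pure index chain i0 = x, i(k+1) = (0 if A[ik] == len(A) else A[ik]); revisits of a
-- zero-valued index follow the same rule, so this chain is exactly the sequence of indices
-- the Python run visits until it stops (lookup stuck out of range keeps the index).
def chainIter (A : List Int) (x : Int) : Nat → Int
  | 0 => x
  | k+1 =>
    match PySem.List.pyGet? A (chainIter A x k) with
    | none => chainIter A x k
    | some v => if v = (A.length : Int) then 0 else v

-- Pre_dfs excludes exactly the inputs on which the Python A does not return: it raises
-- IndexError (the index chain leaves the valid range) or recurses forever (a zero-valued
-- chain looping through index 0); it holds on every input on which A returns a value: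
-- the chain must reach, within len(A)+2 steps and through in-range indices whose current
-- value is nonnegative (original value ≥ 0 and, if positive, not yet visited/negated),
-- an index whose current value is negative (original < 0, or positive and revisited).
def Pre_dfs (x : Int) (A : List Int) : Prop :=
  ∃ k < A.length + 3,
    (∀ j < k, PySem.Raise.InRange A.length (chainIter A x j) ∧
      0 ≤ PySem.List.pyGetD A (chainIter A x j) 0 ∧
      (0 < PySem.List.pyGetD A (chainIter A x j) 0 → ∀ j' < j, chainIter A x j' ≠ chainIter A x j)) ∧
    PySem.Raise.InRange A.length (chainIter A x k) ∧
    (PySem.List.pyGetD A (chainIter A x k) 0 < 0 ∨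
      (0 < PySem.List.pyGetD A (chainIter A x k) 0 ∧ ∃ j < k, chainIter A x j = chainIter A x k))
instance (x : Int) (A : List Int) : Decidable (Pre_dfs x A) := by unfold Pre_dfs; infer_instance

def pvWitness_dfs : Int × List Int := (0, [2, -1])

def Spec_dfs (x : Int) (A : List Int) (out : Int) : Prop := out = dfs_alt x A
instance (x : Int) (A : List Int) (out : Int) : Decidable (Spec_dfs x A out) := by unfold Spec_dfs; infer_instance

-- ===== CLAIM (what is proved, stated in full; the proofs are below) =====
def Claim_equal_dfs : Prop := ∀ (x : Int) (A : List Int), Dom_dfs x A → Pre_dfs x A → Spec_dfs x A (dfs x A)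

-- ===== LEMMAS AND PROOFS =====

-- the stack parameter of the loop is only ever appended to
theorem dfsBloop_stack (f : Nat) : ∀ (cur : Int) (A : List Int) (pre : List (Int × Int)),
    dfsBloop f cur A pre = (dfsBloop f cur A []).map (fun r => (r.1, r.2.1, pre ++ r.2.2)) := by
  induction f with
  | zero => intro cur A pre; rfl
  | succ f ih =>
    intro cur A pre
    simp only [dfsBloop]
    cases h : PySem.List.pyGet? A cur with
    | none => rfl
    | some v =>
      by_cases hv : v ≥ 0
      · simp only [hv, if_pos]
        rw [ih _ _ (pre ++ [(cur, v)]), ih _ _ ([] ++ [(cur, v)])]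
        simp [Option.map_map, Function.comp_def]
      · simp [hv]

-- relates A's recursion to B's loop followed by B's unwind, for any common fuel
theorem dfs_main (f : Nat) : ∀ (x : Int) (A : List Int),
    match dfsBloop f x A [] with
    | none => dfsA f x A = none
    | some r => ∃ v, PySem.List.pyGet? r.2.1 r.1 = some v ∧
        dfsA f x A = some (dfsBunwind r.2.2 v r.2.1) := by
  induction f with
  | zero => intro x A; exact rfl
  | succ f ih =>
    intro x A
    simp only [dfsBloop, dfsA]
    cases h : PySem.List.pyGet? A x with
    | none => exact rfl
    | some v =>
      by_cases hv : v < 0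
      · have hv' : ¬ v ≥ 0 := by omega
        simp only [hv, if_pos, hv']
        exact ⟨v, h, by simp [dfsBunwind]⟩
      · have hv' : v ≥ 0 := by omega
        simp only [hv, if_neg, hv', if_pos, not_false_iff, List.nil_append]
        rw [dfsBloop_stack f _ _ [(x, v)]]
        have := ih (if v = (A.length : Int) then 0 else v) (PySem.List.pySetD A x (-v))
        cases hB : dfsBloop f (if v = (A.length : Int) then 0 else v) (PySem.List.pySetD A x (-v)) [] with
        | none =>
          rw [hB] at this
          simp [this]
        | some r =>
          rw [hB] at this
          obtain ⟨w, hw, hrec⟩ := this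
          refine ⟨w, hw, ?_⟩
          simp only [hrec]
          simp [dfsBunwind, List.foldl_append]

theorem dfs_eq_alt (x : Int) (A : List Int) : dfs x A = dfs_alt x A := by
  unfold dfs dfs_alt
  have := dfs_main (A.length + 2) x A
  cases hB : dfsBloop (A.length + 2) x A [] with
  | none => rw [hB] at this; simp [this]
  | some r =>
    rw [hB] at this
    obtain ⟨v, hv, hrec⟩ := this
    simp [hrec, hv]

-- ===== VERDICT (by name: the statement is the Claim_ definition above) =====
theorem dfs_spec : Claim_equal_dfs := by
  intro x A _ _
  unfold Spec_dfs
  exact dfs_eq_alt x A
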